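-- pv_equiv track=rewrite | github.com/lfpastuch/F1Tenth | node/scan_test.py | corrigeGap
-- ===== SOURCE A (Python) =====
-- def corrigeGap(lista, valorMin, x=3):
--     """
--     Entradas é a lista e o valorMinimo
--     Retorna a lista transformando todos os valores menores do que o valor minimo em 0
--     Ordem de grandeza máximo 8n -> O(n)
--     """
--     newlista= []
--     for c in range(len(lista)):
--         if lista[c] <= valorMin:
--             newlista.append(c)
--     for n in newlista:
--         for i in range(7):
--             a=(n + x - i)
--             if   a >= 0 and a < len(lista):
--                 lista[a] = 0
--
--     #print str(lista) #print para testes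
--     return lista
-- ===== SOURCE B (Python) =====
-- def corrigeGap(lista, valorMin, x=3):
--     # One flag pass, then a per-position gather instead of A's scatter-into-windows.
--     flagged = set(c for c in range(len(lista)) if lista[c] <= valorMin)
--     for p in range(len(lista)):
--         if any((p - x + k) in flagged for k in range(7)):
--             lista[p] = 0
--     return lista
-- ===== Notes on version B (the rewrite author's own statement) =====
-- stated objective: alternative
-- what changed: A scatters zeros into a 7-wide window around each flagged index (with per-write bounds checks); B builds the flagged-index set once and does a single per-position gather, zeroing position p iff some flagged index lies in [p-x, p-x+6].
import Mathlib
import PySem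

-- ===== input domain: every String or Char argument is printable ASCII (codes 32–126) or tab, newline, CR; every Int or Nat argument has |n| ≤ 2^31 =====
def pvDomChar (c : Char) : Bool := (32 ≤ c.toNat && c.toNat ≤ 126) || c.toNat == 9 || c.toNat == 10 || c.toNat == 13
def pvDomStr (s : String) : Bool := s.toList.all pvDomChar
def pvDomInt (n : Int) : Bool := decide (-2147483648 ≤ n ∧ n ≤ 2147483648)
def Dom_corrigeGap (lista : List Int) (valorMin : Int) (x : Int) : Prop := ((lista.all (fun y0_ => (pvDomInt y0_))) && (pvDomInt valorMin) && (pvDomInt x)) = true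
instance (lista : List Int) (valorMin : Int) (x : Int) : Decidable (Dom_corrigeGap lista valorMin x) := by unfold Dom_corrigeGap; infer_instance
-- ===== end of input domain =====

-- B replaces A's scatter-into-7-wide-windows second pass by a per-position gather against the
-- flagged-index set (objective: simpler); both Pythons mutate and return the same list object,
-- and the theorems below are about the returned value.

-- ===== PORT A =====
def corrigeGap (lista : List Int) (valorMin : Int) (x : Int) : List Int :=
  let newlista : List Int :=
    (PySem.List.pyRange 0 (lista.length : Int) 1).foldl
      (fun acc c => if PySem.List.pyGetD lista c 0 ≤ valorMin then acc ++ [c] else acc) []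
  newlista.foldl
    (fun lst n =>
      (PySem.List.pyRange 0 7 1).foldl
        (fun lst i =>
          let a := n + x - i
          if 0 ≤ a ∧ a < (lst.length : Int) then lst.set a.toNat 0 else lst)
        lst)
    lista

-- ===== PORT B =====
def corrigeGap_alt (lista : List Int) (valorMin : Int) (x : Int) : List Int :=
  let flagged : PySem.Set Int :=
    PySem.Set.ofList ((PySem.List.pyRange 0 (lista.length : Int) 1).filter
      (fun c => decide (PySem.List.pyGetD lista c 0 ≤ valorMin)))
  (PySem.List.pyRange 0 (lista.length : Int) 1).foldl
    (fun lst p =>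
      if (PySem.List.pyRange 0 7 1).any (fun k => PySem.Set.contains flagged (p - x + k))
      then lst.set p.toNat 0 else lst)
    lista

-- ===== PRECONDITION & SPEC =====
def Spec_corrigeGap (lista : List Int) (valorMin : Int) (x : Int) (out : List Int) : Prop := out = corrigeGap_alt lista valorMin x
instance (lista : List Int) (valorMin : Int) (x : Int) (out : List Int) : Decidable (Spec_corrigeGap lista valorMin x out) := by unfold Spec_corrigeGap; infer_instance

-- ===== CLAIM (what is proved, stated in full; the proofs are below) =====
def Claim_equal_corrigeGap : Prop := ∀ (lista : List Int) (valorMin : Int) (x : Int), Dom_corrigeGap lista valorMin x → Spec_corrigeGap lista valorMin x (corrigeGap lista valorMin x)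

-- ===== LEMMAS AND PROOFS =====

/-- A's writing pass, as a fold over an explicit list of (possibly out-of-range) write positions. -/
def pvWrites (ps : List Int) (l : List Int) : List Int :=
  ps.foldl (fun lst a => if 0 ≤ a ∧ a < (lst.length : Int) then lst.set a.toNat 0 else lst) l

/-- B's writing pass: positions filtered by a boolean condition. -/
def pvCWrites (f : Int → Bool) (ps : List Int) (l : List Int) : List Int :=
  ps.foldl (fun lst p => if f p then lst.set p.toNat 0 else lst) l

theorem pvWrites_length (ps : List Int) (l : List Int) : (pvWrites ps l).length = l.length := by
  induction ps generalizing l with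
  | nil => rfl
  | cons a ps ih =>
    have hstep : pvWrites (a :: ps) l =
        pvWrites ps (if 0 ≤ a ∧ a < (l.length : Int) then l.set a.toNat 0 else l) := rfl
    rw [hstep, ih]
    split <;> simp

theorem pvCWrites_length (f : Int → Bool) (ps : List Int) (l : List Int) :
    (pvCWrites f ps l).length = l.length := by
  induction ps generalizing l with
  | nil => rfl
  | cons a ps ih =>
    have hstep : pvCWrites f (a :: ps) l =
        pvCWrites f ps (if f a then l.set a.toNat 0 else l) := rfl
    rw [hstep, ih]
    split <;> simp

theorem pvWrites_getElem? (ps : List Int) (l : List Int) (q : Nat) (hq : q < l.length) :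
    (pvWrites ps l)[q]? = if (q : Int) ∈ ps then some 0 else l[q]? := by
  induction ps generalizing l with
  | nil => simp [pvWrites]
  | cons a ps ih =>
    have hstep : pvWrites (a :: ps) l =
        pvWrites ps (if 0 ≤ a ∧ a < (l.length : Int) then l.set a.toNat 0 else l) := rfl
    rw [hstep]
    by_cases hin : 0 ≤ a ∧ a < (l.length : Int)
    · rw [if_pos hin, ih _ (by simpa using hq), List.getElem?_set]
      by_cases hqa : (q : Int) = a
      · have h1 : a.toNat = q := by omega
        simp [h1, List.mem_cons, hqa]
        exact fun _ => hq
      · have h1 : a.toNat ≠ q := by omega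
        simp [h1, List.mem_cons, hqa]
    · rw [if_neg hin, ih _ hq]
      have hqa : (q : Int) ≠ a := by omega
      simp [List.mem_cons, hqa]

theorem pvCWrites_getElem? (f : Int → Bool) (ps : List Int) (l : List Int) (q : Nat)
    (hq : q < l.length) (hps : ∀ p ∈ ps, 0 ≤ p) :
    (pvCWrites f ps l)[q]? = if (q : Int) ∈ ps ∧ f q then some 0 else l[q]? := by
  induction ps generalizing l with
  | nil => simp [pvCWrites]
  | cons a ps ih =>
    have ha : 0 ≤ a := hps a (by simp)
    have hps' : ∀ p ∈ ps, 0 ≤ p := fun p hp => hps p (by simp [hp])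
    have hstep : pvCWrites f (a :: ps) l =
        pvCWrites f ps (if f a then l.set a.toNat 0 else l) := rfl
    rw [hstep]
    by_cases hf : f a = true
    · rw [if_pos hf, ih _ (by simpa using hq) hps', List.getElem?_set]
      by_cases hqa : (q : Int) = a
      · have h1 : a.toNat = q := by omega
        simp [h1, List.mem_cons, hqa]
        simp [hf, hq]
      · have h1 : a.toNat ≠ q := by omega
        simp [h1, List.mem_cons, hqa]
    · rw [if_neg hf, ih _ hq hps']
      by_cases hqa : (q : Int) = a
      · simp [List.mem_cons, hqa]
        simp [hf]
      · simp [List.mem_cons, hqa]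

theorem pvWrites_append (ps qs : List Int) (l : List Int) :
    pvWrites (ps ++ qs) l = pvWrites qs (pvWrites ps l) := by
  simp [pvWrites, List.foldl_append]

/-- A's inner seven-write loop is pvWrites of the mapped positions. -/
theorem pvInner_eq_writes (n xv : Int) (l : List Int) :
    (PySem.List.pyRange 0 7 1).foldl
      (fun lst i =>
        let a := n + xv - i
        if 0 ≤ a ∧ a < (lst.length : Int) then lst.set a.toNat 0 else lst) l
    = pvWrites ((PySem.List.pyRange 0 7 1).map (fun i => n + xv - i)) l := by
  simp only [pvWrites, List.foldl_map]

/-- A's outer loop is pvWrites of the flat-mapped window positions. -/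
theorem pvOuter_eq_writes (ws : List Int) (xv : Int) (l : List Int) :
    ws.foldl
      (fun lst n =>
        (PySem.List.pyRange 0 7 1).foldl
          (fun lst i =>
            let a := n + xv - i
            if 0 ≤ a ∧ a < (lst.length : Int) then lst.set a.toNat 0 else lst) lst) l
    = pvWrites (ws.flatMap (fun n => (PySem.List.pyRange 0 7 1).map (fun i => n + xv - i))) l := by
  induction ws generalizing l with
  | nil => rfl
  | cons n ws ih =>
    rw [List.foldl_cons, List.flatMap_cons, pvWrites_append, ih, pvInner_eq_writes]

-- ===== VERDICT (by name: the statement is the Claim_ definition above) =====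
theorem corrigeGap_spec : Claim_equal_corrigeGap := by
  intro lista valorMin x _
  unfold Spec_corrigeGap
  set ws : List Int := (PySem.List.pyRange 0 (lista.length : Int) 1).filter
      (fun c => decide (PySem.List.pyGetD lista c 0 ≤ valorMin)) with hws
  set cond : Int → Bool := fun p => (PySem.List.pyRange 0 7 1).any
      (fun k => PySem.Set.contains (PySem.Set.ofList ws) (p - x + k)) with hcond
  have hA0 : corrigeGap lista valorMin x =
      ((PySem.List.pyRange 0 (lista.length : Int) 1).foldl
        (fun acc c => if PySem.List.pyGetD lista c 0 ≤ valorMin then acc ++ [c] else acc)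
        []).foldl
        (fun lst n =>
          (PySem.List.pyRange 0 7 1).foldl
            (fun lst i =>
              let a := n + x - i
              if 0 ≤ a ∧ a < (lst.length : Int) then lst.set a.toNat 0 else lst) lst)
        lista := rfl
  have hA : corrigeGap lista valorMin x =
      pvWrites (ws.flatMap (fun n => (PySem.List.pyRange 0 7 1).map (fun i => n + x - i))) lista := by
    rw [hA0, PySem.List.foldl_append_ite_eq_filter, List.nil_append, ← hws, pvOuter_eq_writes]
  have hB : corrigeGap_alt lista valorMin x =
      pvCWrites cond (PySem.List.pyRange 0 (lista.length : Int) 1) lista := rfl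
  rw [hA, hB]
  apply List.ext_getElem?
  intro q
  by_cases hq : q < lista.length
  · rw [pvWrites_getElem? _ _ _ hq, pvCWrites_getElem? _ _ _ _ hq
      (fun p hp => ((PySem.List.mem_pyRange_one).mp hp).1)]
    have hmemiff :
        ((q : Int) ∈ ws.flatMap (fun n => (PySem.List.pyRange 0 7 1).map (fun i => n + x - i)))
        ↔ ((q : Int) ∈ PySem.List.pyRange 0 (lista.length : Int) 1 ∧ cond (q : Int) = true) := by
      constructor
      · intro h
        rcases List.mem_flatMap.mp h with ⟨n, hn, hm⟩
        rcases List.mem_map.mp hm with ⟨i, hi, hiq⟩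
        refine ⟨PySem.List.mem_pyRange_one.mpr (by constructor <;> omega), ?_⟩
        rw [hcond]
        apply List.any_eq_true.mpr
        refine ⟨i, hi, ?_⟩
        rw [PySem.Set.contains_iff, PySem.Set.mem_ofList]
        have hni : (q : Int) - x + i = n := by omega
        rw [hni]
        exact hn
      · rintro ⟨_, hc⟩
        rw [hcond] at hc
        rcases List.any_eq_true.mp hc with ⟨k, hk, hcont⟩
        rw [PySem.Set.contains_iff, PySem.Set.mem_ofList] at hcont
        exact List.mem_flatMap.mpr ⟨(q : Int) - x + k, hcont, List.mem_map.mpr ⟨k, hk, by omega⟩⟩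
    rw [if_congr hmemiff rfl rfl]
  · have h1 : (pvWrites (ws.flatMap (fun n => (PySem.List.pyRange 0 7 1).map (fun i => n + x - i))) lista)[q]? = none := by
      rw [List.getElem?_eq_none_iff, pvWrites_length]
      omega
    have h2 : (pvCWrites cond (PySem.List.pyRange 0 (lista.length : Int) 1) lista)[q]? = none := by
      rw [List.getElem?_eq_none_iff, pvCWrites_length]
      omega
    rw [h1, h2]
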